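-- pv_equiv track=rewrite | github.com/bipinkrish/File-Converter-Bot | tictactoe.py | convert
-- ===== SOURCE A (Python) =====
-- def convert(data):
--     datalist = []
--     temp = []
--     for i in range(9):
--         if data[i] == '1':
--             temp.append("X")
--         elif data[i] == "2":
--             temp.append("O")
--         else:
--             temp.append(" ")
--
--         if (i+1)%3 == 0:
--             datalist.append(temp)
--             temp = []
--
--     return datalist
-- ===== SOURCE B (Python) =====
-- def convert(data):
--     def sym(c):
--         return "X" if c == '1' else "O" if c == '2' else " "
--
--     def rows(i):
--         if i == 9:
--             return []
--         return [[sym(data[i]), sym(data[i + 1]), sym(data[i + 2])]] + rows(i + 3)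
--
--     return rows(0)
-- ===== Notes on version B (the rewrite author's own statement) =====
-- stated objective: simpler
-- what changed: Replaces the single index loop with a running temp buffer and (i+1)%3 flush by a recursive row builder: each call constructs one whole row from three explicit indices and recurses by 3, so there is no accumulator or modulo test at all.
import Mathlib
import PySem

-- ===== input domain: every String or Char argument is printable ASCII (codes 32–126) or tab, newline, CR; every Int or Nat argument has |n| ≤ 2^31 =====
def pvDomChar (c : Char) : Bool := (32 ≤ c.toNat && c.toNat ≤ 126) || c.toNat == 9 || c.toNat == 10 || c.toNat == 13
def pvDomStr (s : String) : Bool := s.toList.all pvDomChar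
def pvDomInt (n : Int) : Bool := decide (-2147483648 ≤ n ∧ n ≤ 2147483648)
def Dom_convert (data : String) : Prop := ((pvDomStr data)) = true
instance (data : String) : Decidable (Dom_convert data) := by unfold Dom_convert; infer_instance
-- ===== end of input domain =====

-- B replaces A's single loop with a temp buffer flushed at (i+1)%3==0 by a recursive
-- row builder: each call makes one whole row from three explicit indices and recurses by 3 (simpler).


-- ===== PORT A =====
-- data[i] is ported as pyGetD (default unreachable: Pre_ guarantees the index is in range)
def convert (data : String) : List (List String) :=
  ((PySem.List.pyRange 0 9 1).foldl
    (fun (st : List (List String) × List String) (i : Int) =>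
      let c := PySem.List.pyGetD data.toList i ' '
      let temp := st.2 ++ [if c = '1' then "X" else if c = '2' then "O" else " "]
      if PySem.Int.mod (i + 1) 3 = 0 then (st.1 ++ [temp], []) else (st.1, temp))
    ([], [])).1

-- ===== PORT B =====
def tttSym (c : Char) : String := if c = '1' then "X" else if c = '2' then "O" else " "

-- rows(i): fuel only guards termination (Python's rows is called with i = 0,3,6,9 only)
def tttRows (data : List Char) (i : Int) : Nat → List (List String)
  | 0 => []
  | fuel + 1 =>
    if i = 9 then []
    else [[tttSym (PySem.List.pyGetD data i ' '),
           tttSym (PySem.List.pyGetD data (i + 1) ' '),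
           tttSym (PySem.List.pyGetD data (i + 2) ' ')]] ++ tttRows data (i + 3) fuel

def convert_alt (data : String) : List (List String) :=
  tttRows data.toList 0 4

-- ===== PRECONDITION & SPEC =====
-- Pre_ excludes strings shorter than 9 characters, on which A raises IndexError.
def Pre_convert (data : String) : Prop := 9 ≤ data.toList.length
instance (data : String) : Decidable (Pre_convert data) := by unfold Pre_convert; infer_instance
def pvWitness_convert : String := "120012x21"

def Spec_convert (data : String) (out : List (List String)) : Prop := out = convert_alt data
instance (data : String) (out : List (List String)) : Decidable (Spec_convert data out) := by unfold Spec_convert; infer_instance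

-- ===== CLAIM (what is proved, stated in full; the proofs are below) =====
def Claim_equal_convert : Prop := ∀ (data : String), Dom_convert data → Pre_convert data → Spec_convert data (convert data)

-- ===== LEMMAS AND PROOFS =====

-- ===== VERDICT (by name: the statement is the Claim_ definition above) =====
theorem convert_spec : Claim_equal_convert := by
  intro data _ _
  unfold Spec_convert
  simp only [convert, convert_alt, tttRows, tttSym]
  simp [PySem.List.pyRange, List.range_succ, PySem.Int.mod]
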